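-- pv_equiv track=rewrite | github.com/CodeCraft-bit/esercizi_recupero | esercizio_1.py | converti
-- ===== SOURCE A (Python) =====
-- def converti (x: list[tuple]) -> dict:
--     dizionario1: dict = {}
--     for element in x:
--         key, value = element[0], element[1]
--         if key in dizionario1:
--             dizionario1[key] += value
--         else:
--             dizionario1[key] = value
--     return dizionario1
-- ===== SOURCE B (Python) =====
-- import functools, operator
--
-- def converti(x):
--     # group values by key in one pass, then reduce each group with +
--     index = {}
--     for element in x:
--         index.setdefault(element[0], []).append(element[1])
--     return {k: functools.reduce(operator.add, vals) for k, vals in index.items()}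
-- ===== Notes on version B (the rewrite author's own statement) =====
-- stated objective: alternative
-- what changed: Replaces A's single check-and-accumulate dict loop with a two-phase group-then-reduce: one pass builds key -> list of values via setdefault/append, then a dict comprehension folds each group with operator.add.
import Mathlib
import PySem

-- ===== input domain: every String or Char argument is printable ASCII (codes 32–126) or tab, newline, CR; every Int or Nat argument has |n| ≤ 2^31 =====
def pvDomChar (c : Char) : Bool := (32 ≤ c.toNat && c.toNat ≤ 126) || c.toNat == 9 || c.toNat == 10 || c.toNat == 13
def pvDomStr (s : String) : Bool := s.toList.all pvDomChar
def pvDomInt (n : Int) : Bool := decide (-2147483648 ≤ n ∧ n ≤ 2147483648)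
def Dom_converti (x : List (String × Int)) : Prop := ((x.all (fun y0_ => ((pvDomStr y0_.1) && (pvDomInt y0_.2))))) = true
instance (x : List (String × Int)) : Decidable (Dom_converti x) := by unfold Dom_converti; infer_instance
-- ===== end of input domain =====

-- B replaces A's check-and-accumulate dict loop by a two-phase group-then-reduce (same cost, different decomposition).


-- ===== PORT A =====
-- A: one dict, accumulate in place: d[key] += value if present, else d[key] = value.
def converti (x : List (String × Int)) : List (String × Int) :=
  (x.foldl (fun d p =>
      if d.contains p.1 then d.insert p.1 ((d.get? p.1).getD 0 + p.2)
      else d.insert p.1 p.2)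
    (PySem.Dict.empty : PySem.Dict String Int)).items

-- ===== PORT B =====
-- functools.reduce(operator.add, vals): fold over the tail starting from the head.
-- (index values are always nonempty lists; the [] branch is unreachable, Python would raise there)
def pyReduceAdd (vals : List Int) : Int :=
  match vals with
  | [] => 0
  | h :: t => t.foldl (· + ·) h

def converti_alt (x : List (String × Int)) : List (String × Int) :=
  let index : PySem.Dict String (List Int) :=
    x.foldl (fun d p => d.modify p.1 [] (· ++ [p.2])) PySem.Dict.empty
  index.items.map (fun p => (p.1, pyReduceAdd p.2))

-- ===== PRECONDITION & SPEC =====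
def Spec_converti (x : List (String × Int)) (out : List (String × Int)) : Prop := out = converti_alt x
instance (x : List (String × Int)) (out : List (String × Int)) : Decidable (Spec_converti x out) := by unfold Spec_converti; infer_instance

-- ===== CLAIM (what is proved, stated in full; the proofs are below) =====
def Claim_equal_converti : Prop := ∀ (x : List (String × Int)), Dom_converti x → Spec_converti x (converti x)

-- ===== LEMMAS AND PROOFS =====

-- A's loop body is an insert with a computed value (the two branches merged)
lemma convA_body (d : PySem.Dict String Int) (p : String × Int) :
    (if d.contains p.1 then d.insert p.1 ((d.get? p.1).getD 0 + p.2) else d.insert p.1 p.2)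
      = d.insert p.1 (d.getD p.1 0 + p.2) := by
  by_cases h : d.contains p.1 = true
  · simp [h, PySem.Dict.getD_eq_get?_getD]
  · simp only [Bool.not_eq_true] at h
    rw [PySem.Dict.getD_of_not_contains _ _ h]
    simp [h]

-- A's accumulator looked up with default 0: starting value plus the sum of this key's values
lemma convA_getD (x : List (String × Int)) (d : PySem.Dict String Int) (k : String) :
    (x.foldl (fun d p => d.insert p.1 (d.getD p.1 0 + p.2)) d).getD k 0
      = d.getD k 0 + ((x.filter (fun p => p.1 == k)).map (·.2)).sum := by
  induction x generalizing d with
  | nil => simp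
  | cons p t ih =>
    simp only [List.foldl_cons, ih, List.filter_cons]
    by_cases h : p.1 = k
    · subst h
      simp [PySem.Dict.getD_insert_self]
      ring
    · rw [PySem.Dict.getD_insert_of_ne _ _ _ (Ne.symm h)]
      simp [h]

lemma reduce_eq_sum (l : List Int) : pyReduceAdd l = l.sum := by
  cases l with
  | nil => rfl
  | cons h t =>
    show t.foldl (· + ·) h = (h :: t).sum
    rw [List.sum_cons]
    exact PySem.List.foldl_add (g := id) (l := t) (a := h) |>.trans (by simp)

theorem converti_spec : Claim_equal_converti := by
  intro x _
  unfold Spec_converti converti converti_alt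
  have hA : x.foldl (fun d p =>
      if d.contains p.1 then d.insert p.1 ((d.get? p.1).getD 0 + p.2)
      else d.insert p.1 p.2) (PySem.Dict.empty : PySem.Dict String Int)
      = x.foldl (fun d p => d.insert p.1 (d.getD p.1 0 + p.2)) PySem.Dict.empty :=
    PySem.List.foldl_congr_mem _ _ _ _ (fun d p _ => convA_body d p)
  rw [hA]
  set dA := x.foldl (fun d p => d.insert p.1 (d.getD p.1 0 + p.2))
      (PySem.Dict.empty : PySem.Dict String Int) with hdA
  set dB := x.foldl (fun d p => d.modify p.1 [] (· ++ [p.2]))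
      (PySem.Dict.empty : PySem.Dict String (List Int)) with hdB
  have hndA : dA.keys.Nodup := by
    rw [hdA]
    exact PySem.Dict.nodup_keys_foldl_insert_key x (·.1)
      (fun d p => d.getD p.1 0 + p.2) _ PySem.Dict.nodup_keys_empty
  have hndB : dB.keys.Nodup := by
    rw [hdB]
    exact PySem.Dict.nodup_keys_foldl_modify_key x (·.1) [] (fun d p => (· ++ [p.2])) _
      PySem.Dict.nodup_keys_empty
  have hkeys : dA.keys = dB.keys := by
    rw [hdA, hdB, PySem.Dict.keys_foldl_insert_key, PySem.Dict.keys_foldl_modify_key]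
    rfl
  show dA.items = List.map (fun p => (p.1, pyReduceAdd p.2)) dB.items
  rw [PySem.Dict.items_eq_map_keys dA hndA 0, PySem.Dict.items_eq_map_keys dB hndB [],
      ← hkeys, List.map_map]
  refine List.map_congr_left (fun k _ => ?_)
  simp only [Function.comp]
  have h1 : dA.getD k 0 = ((x.filter (fun p => p.1 == k)).map (·.2)).sum := by
    rw [hdA, convA_getD]; simp
  have h2 : dB.getD k [] = (x.filter (fun p => p.1 == k)).map (·.2) := by
    rw [hdB, PySem.Dict.getD_foldl_modify_append]; simp
  simp [h1, h2, reduce_eq_sum]
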